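-- pv_equiv track=rewrite | github.com/cookiedan42/OperationsResearch_1 | OR/TwoFactorGraph.py | get_MinMaxX
-- ===== SOURCE A (Python) =====
-- def get_MinMaxX(myLimits):
--     store = dict()
--     for i in myLimits:
--         if i[1] in store.keys():
--             store[i[1]] +=[i]
--         else:
--             store[i[1]] =[i]
--     minVals = []
--     maxVals = []
--     for k,v in store.items():
--         maxX = max([i[0] for i in v])
--         minX = min([i[0] for i in v])
--         minVals.append((minX,k))
--         maxVals.append((maxX,k))
--
--     minVals.sort(key=lambda x:x[1])
--     maxVals.sort(key=lambda x:x[1])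
--     return minVals,maxVals
-- ===== SOURCE B (Python) =====
-- def get_MinMaxX(myLimits):
--     store = {}
--     for x, y in myLimits:
--         if y in store:
--             mn, mx = store[y]
--             store[y] = (min(mn, x), max(mx, x))
--         else:
--             store[y] = (x, x)
--     ys = sorted(store)
--     return [(store[y][0], y) for y in ys], [(store[y][1], y) for y in ys]
-- ===== Notes on version B (the rewrite author's own statement) =====
-- stated objective: simpler
-- what changed: One fused pass keeps only a running (minX, maxX) pair per y instead of grouping full point lists and reducing them later, and the results are emitted by mapping over the sorted keys instead of building tuple lists and sorting them.
import Mathlib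
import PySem

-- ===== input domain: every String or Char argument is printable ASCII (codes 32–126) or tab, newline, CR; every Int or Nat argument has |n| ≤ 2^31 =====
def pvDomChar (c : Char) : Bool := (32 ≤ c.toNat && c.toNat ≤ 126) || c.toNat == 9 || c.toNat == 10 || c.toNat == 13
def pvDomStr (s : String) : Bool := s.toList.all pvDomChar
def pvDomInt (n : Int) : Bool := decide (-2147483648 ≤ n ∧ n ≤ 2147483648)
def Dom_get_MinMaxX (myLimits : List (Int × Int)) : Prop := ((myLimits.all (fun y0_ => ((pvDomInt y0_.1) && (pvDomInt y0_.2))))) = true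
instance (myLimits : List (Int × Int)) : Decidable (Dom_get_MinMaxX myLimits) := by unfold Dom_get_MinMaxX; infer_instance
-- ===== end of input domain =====

-- B fuses grouping and reduction: one pass keeps a running (minX, maxX) pair per y
-- instead of full per-y point lists reduced and sorted afterwards; same result, simpler.

-- ===== PORT A =====
-- 'store[i[1]] += [i]' / 'store[i[1]] = [i]' ; the getD default [] is unreachable (contains was checked)
def pvStepA (d : PySem.Dict Int (List (Int × Int))) (i : Int × Int) : PySem.Dict Int (List (Int × Int)) :=
  if d.contains i.2 then d.insert i.2 (d.getD i.2 [] ++ [i]) else d.insert i.2 [i]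

def get_MinMaxX (myLimits : List (Int × Int)) : (List (Int × Int)) × (List (Int × Int)) :=
  let store := myLimits.foldl pvStepA PySem.Dict.empty
  -- for k,v in store.items(): append (minX,k) / (maxX,k); max/min of a nonempty list
  -- (the .getD 0 default is unreachable: every stored list is nonempty)
  let mm := store.items.foldl (fun (acc : List (Int × Int) × List (Int × Int)) kv =>
      let maxX := (PySem.List.max? (kv.2.map (fun i => i.1)) (fun x => x)).getD 0
      let minX := (PySem.List.min? (kv.2.map (fun i => i.1)) (fun x => x)).getD 0
      (acc.1 ++ [(minX, kv.1)], acc.2 ++ [(maxX, kv.1)])) ([], [])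
  (PySem.List.sorted mm.1 (fun x => x.2) false, PySem.List.sorted mm.2 (fun x => x.2) false)

-- ===== PORT B =====
def pvStepB (d : PySem.Dict Int (Int × Int)) (p : Int × Int) : PySem.Dict Int (Int × Int) :=
  if d.contains p.2 then
    let q := d.getD p.2 (0, 0)   -- unreachable default: key was checked
    d.insert p.2 (min q.1 p.1, max q.2 p.1)
  else d.insert p.2 (p.1, p.1)

def get_MinMaxX_alt (myLimits : List (Int × Int)) : (List (Int × Int)) × (List (Int × Int)) :=
  let store := myLimits.foldl pvStepB PySem.Dict.empty
  let ys := PySem.List.sorted store.keys (fun y => y) false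
  (ys.map (fun y => ((store.getD y (0, 0)).1, y)), ys.map (fun y => ((store.getD y (0, 0)).2, y)))

-- ===== PRECONDITION & SPEC =====
def Spec_get_MinMaxX (myLimits : List (Int × Int)) (out : (List (Int × Int)) × (List (Int × Int))) : Prop := out = get_MinMaxX_alt myLimits
instance (myLimits : List (Int × Int)) (out : (List (Int × Int)) × (List (Int × Int))) : Decidable (Spec_get_MinMaxX myLimits out) := by unfold Spec_get_MinMaxX; infer_instance

-- ===== CLAIM (what is proved, stated in full; the proofs are below) =====
def Claim_equal_get_MinMaxX : Prop := ∀ (myLimits : List (Int × Int)), Dom_get_MinMaxX myLimits → Spec_get_MinMaxX myLimits (get_MinMaxX myLimits)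

-- ===== LEMMAS AND PROOFS =====

-- min/max of the first components of a nonempty stored list, in A's evaluation order
def pvMinFst : List (Int × Int) → Int
  | [] => 0
  | p :: t => (t.map Prod.fst).foldl min p.1

def pvMaxFst : List (Int × Int) → Int
  | [] => 0
  | p :: t => (t.map Prod.fst).foldl max p.1

lemma pvMinFst_append (v : List (Int × Int)) (p : Int × Int) (h : v ≠ []) :
    pvMinFst (v ++ [p]) = min (pvMinFst v) p.1 := by
  cases v with
  | nil => exact absurd rfl h
  | cons q t => simp [pvMinFst, List.foldl_append]

lemma pvMaxFst_append (v : List (Int × Int)) (p : Int × Int) (h : v ≠ []) :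
    pvMaxFst (v ++ [p]) = max (pvMaxFst v) p.1 := by
  cases v with
  | nil => exact absurd rfl h
  | cons q t => simp [pvMaxFst, List.foldl_append]

-- invariant relating A's dict of point lists with B's dict of running (min, max) pairs
def pvInv (dA : PySem.Dict Int (List (Int × Int))) (dB : PySem.Dict Int (Int × Int)) : Prop :=
  dA.keys = dB.keys ∧ dA.keys.Nodup ∧
  ∀ k v, dA.get? k = some v → v ≠ [] ∧ dB.get? k = some (pvMinFst v, pvMaxFst v)

lemma pvInv_step (dA : PySem.Dict Int (List (Int × Int))) (dB : PySem.Dict Int (Int × Int))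
    (p : Int × Int) (h : pvInv dA dB) : pvInv (pvStepA dA p) (pvStepB dB p) := by
  obtain ⟨hk, hnd, hget⟩ := h
  have hcont : dA.contains p.2 = dB.contains p.2 := by
    rw [PySem.Dict.contains_eq_decide_mem_keys, PySem.Dict.contains_eq_decide_mem_keys, hk]
  by_cases hc : dA.contains p.2 = true
  · -- key already present: both overwrite in place
    have hsome : ∃ v, dA.get? p.2 = some v := by
      cases hv : dA.get? p.2 with
      | none =>
        have := (PySem.Dict.get?_eq_none_iff_contains dA p.2).mp hv
        rw [hc] at this; simp at this
      | some v => exact ⟨v, rfl⟩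
    obtain ⟨v, hv⟩ := hsome
    obtain ⟨hvne, hBv⟩ := hget p.2 v hv
    have hA : pvStepA dA p = dA.insert p.2 (v ++ [p]) := by
      rw [pvStepA, if_pos hc, PySem.Dict.getD_of_get?_eq_some dA [] hv]
    have hB : pvStepB dB p
        = dB.insert p.2 (min (pvMinFst v) p.1, max (pvMaxFst v) p.1) := by
      rw [pvStepB, if_pos (hcont ▸ hc), PySem.Dict.getD_of_get?_eq_some dB (0, 0) hBv]
    rw [hA, hB]
    refine ⟨?_, ?_, ?_⟩
    · rw [PySem.Dict.keys_insert_of_contains dA _ hc,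
        PySem.Dict.keys_insert_of_contains dB _ (hcont ▸ hc), hk]
    · rw [PySem.Dict.keys_insert_of_contains dA _ hc]; exact hnd
    · intro k w hw
      rcases eq_or_ne k p.2 with hkp | hkp
      · subst hkp
        rw [PySem.Dict.get?_insert_self] at hw
        injection hw with hw; subst hw
        refine ⟨by simp [hvne], ?_⟩
        rw [PySem.Dict.get?_insert_self,
          pvMinFst_append v p hvne, pvMaxFst_append v p hvne]
      · rw [PySem.Dict.get?_insert_of_ne dA _ hkp] at hw
        obtain ⟨h1, h2⟩ := hget k w hw
        exact ⟨h1, by rw [PySem.Dict.get?_insert_of_ne dB _ hkp]; exact h2⟩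
  · -- fresh key: both append it
    have hc' : dA.contains p.2 = false := by simpa using hc
    have hcB : dB.contains p.2 = false := hcont ▸ hc'
    have hA : pvStepA dA p = dA.insert p.2 [p] := by
      rw [pvStepA, if_neg (by simp [hc'])]
    have hB : pvStepB dB p = dB.insert p.2 (p.1, p.1) := by
      rw [pvStepB, if_neg (by simp [hcB])]
    rw [hA, hB]
    refine ⟨?_, ?_, ?_⟩
    · rw [PySem.Dict.keys_insert_of_not_contains dA _ hc',
        PySem.Dict.keys_insert_of_not_contains dB _ hcB, hk]
    · rw [PySem.Dict.keys_insert_of_not_contains dA _ hc']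
      refine List.Nodup.append hnd (List.nodup_singleton _) ?_
      intro a ha hb
      simp at hb; subst hb
      have := (PySem.Dict.contains_iff_mem_keys dA p.2).mpr ha
      rw [hc'] at this; exact absurd this (by simp)
    · intro k w hw
      rcases eq_or_ne k p.2 with hkp | hkp
      · subst hkp
        rw [PySem.Dict.get?_insert_self] at hw
        injection hw with hw; subst hw
        exact ⟨by simp, by rw [PySem.Dict.get?_insert_self]; rfl⟩
      · rw [PySem.Dict.get?_insert_of_ne dA _ hkp] at hw
        obtain ⟨h1, h2⟩ := hget k w hw
        exact ⟨h1, by rw [PySem.Dict.get?_insert_of_ne dB _ hkp]; exact h2⟩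

lemma pvInv_fold (l : List (Int × Int)) :
    pvInv (l.foldl pvStepA PySem.Dict.empty) (l.foldl pvStepB PySem.Dict.empty) := by
  induction l using List.reverseRecOn with
  | nil =>
    refine ⟨rfl, by simp [PySem.Dict.keys_empty], ?_⟩
    intro k v h
    simp [PySem.Dict.get?_empty] at h
  | append_singleton t p ih =>
    rw [List.foldl_append, List.foldl_append]
    exact pvInv_step _ _ p ih

-- A's append loop over items produces two maps
lemma pvPairFold (l : List (Int × List (Int × Int))) (a b : List (Int × Int)) :
    l.foldl (fun (acc : List (Int × Int) × List (Int × Int)) kv =>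
      (acc.1 ++ [((PySem.List.min? (kv.2.map (fun i => i.1)) (fun x => x)).getD 0, kv.1)],
       acc.2 ++ [((PySem.List.max? (kv.2.map (fun i => i.1)) (fun x => x)).getD 0, kv.1)])) (a, b)
    = (a ++ l.map (fun kv => ((PySem.List.min? (kv.2.map (fun i => i.1)) (fun x => x)).getD 0, kv.1)),
       b ++ l.map (fun kv => ((PySem.List.max? (kv.2.map (fun i => i.1)) (fun x => x)).getD 0, kv.1))) := by
  induction l generalizing a b with
  | nil => simp
  | cons kv t ih => simp [ih]

lemma pvMin?_eq (v : List (Int × Int)) (h : v ≠ []) :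
    (PySem.List.min? (v.map (fun i => i.1)) (fun x => x)).getD 0 = pvMinFst v := by
  cases v with
  | nil => exact absurd rfl h
  | cons p t => rw [List.map_cons, PySem.List.min?_id_cons]; rfl

lemma pvMax?_eq (v : List (Int × Int)) (h : v ≠ []) :
    (PySem.List.max? (v.map (fun i => i.1)) (fun x => x)).getD 0 = pvMaxFst v := by
  cases v with
  | nil => exact absurd rfl h
  | cons p t => rw [List.map_cons, PySem.List.max?_id_cons]; rfl

-- sorting a list whose second components are the (distinct) dict keys = mapping over the sorted keys
lemma pvSorted_map (keys : List Int) (hnd : keys.Nodup) (g : Int → Int)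
    (xs : List (Int × Int)) (hxs : xs = keys.map (fun y => (g y, y))) :
    PySem.List.sorted xs (fun x => x.2) false
      = (PySem.List.sorted keys (fun y => y) false).map (fun y => (g y, y)) := by
  apply PySem.List.sorted_eq_of_perm_of_pairwise_lt
  · rw [hxs]
    exact (PySem.List.sorted_perm keys (fun y => y) false).map _
  · rw [List.pairwise_map]
    have hle := PySem.List.sorted_pairwise keys (fun y => y)
    have hne : (PySem.List.sorted keys (fun y => y) false).Nodup :=
      (PySem.List.sorted_perm keys (fun y => y) false).nodup_iff.mpr hnd
    exact (hle.and hne).imp (fun h => lt_of_le_of_ne h.1 h.2)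

-- ===== VERDICT (by name: the statement is the Claim_ definition above) =====
theorem get_MinMaxX_spec : Claim_equal_get_MinMaxX := by
  intro myLimits _
  show get_MinMaxX myLimits = get_MinMaxX_alt myLimits
  obtain ⟨hk, hnd, hget⟩ := pvInv_fold myLimits
  have hndB : (myLimits.foldl pvStepB PySem.Dict.empty).keys.Nodup := hk ▸ hnd
  have hitem : ∀ kv ∈ (myLimits.foldl pvStepA PySem.Dict.empty).items,
      kv.2 ≠ [] ∧ (myLimits.foldl pvStepB PySem.Dict.empty).getD kv.1 (0, 0)
        = (pvMinFst kv.2, pvMaxFst kv.2) := by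
    intro kv hkv
    have hmem : (kv.1, kv.2) ∈ (myLimits.foldl pvStepA PySem.Dict.empty).items := by
      simpa using hkv
    have h := hget kv.1 kv.2 (PySem.Dict.get?_of_mem_items _ hmem hnd)
    exact ⟨h.1, PySem.Dict.getD_of_get?_eq_some _ (0, 0) h.2⟩
  have hmapMin : (myLimits.foldl pvStepA PySem.Dict.empty).items.map (fun kv =>
        ((PySem.List.min? (kv.2.map (fun i => i.1)) (fun x => x)).getD 0, kv.1))
      = (myLimits.foldl pvStepB PySem.Dict.empty).keys.map
          (fun y => (((myLimits.foldl pvStepB PySem.Dict.empty).getD y (0, 0)).1, y)) := by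
    rw [← hk]
    show _ = ((myLimits.foldl pvStepA PySem.Dict.empty).items.map Prod.fst).map _
    rw [List.map_map]
    apply List.map_congr_left
    intro kv hkv
    obtain ⟨hne, hD⟩ := hitem kv hkv
    simp [Function.comp, hD, pvMin?_eq kv.2 hne]
  have hmapMax : (myLimits.foldl pvStepA PySem.Dict.empty).items.map (fun kv =>
        ((PySem.List.max? (kv.2.map (fun i => i.1)) (fun x => x)).getD 0, kv.1))
      = (myLimits.foldl pvStepB PySem.Dict.empty).keys.map
          (fun y => (((myLimits.foldl pvStepB PySem.Dict.empty).getD y (0, 0)).2, y)) := by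
    rw [← hk]
    show _ = ((myLimits.foldl pvStepA PySem.Dict.empty).items.map Prod.fst).map _
    rw [List.map_map]
    apply List.map_congr_left
    intro kv hkv
    obtain ⟨hne, hD⟩ := hitem kv hkv
    simp [Function.comp, hD, pvMax?_eq kv.2 hne]
  simp only [get_MinMaxX, get_MinMaxX_alt]
  rw [pvPairFold]
  simp only [List.nil_append]
  refine Prod.ext ?_ ?_
  · exact pvSorted_map _ hndB _ _ hmapMin
  · exact pvSorted_map _ hndB _ _ hmapMax
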